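-- pv_equiv track=rewrite | github.com/cyberrumor/ammo | ammo/controller.py | _fomod_flags_match
-- ===== SOURCE A (Python) =====
-- def _fomod_flags_match(flags: dict, expected_flags: dict) -> bool:
--     """
--     Compare actual flags with expected flags to determine whether
--     the plugin associated with expected_flags should be included.
--
--     Returns whether the plugin which owns expected_flags matches.
--     """
--     match = False
--     for k, v in expected_flags.items():
--         if k in flags:
--             if flags[k] != v:
--                 if (
--                     "operator" in expected_flags
--                     and expected_flags["operator"] == "and"
--                 ):
--                     # Mismatched flag. Skip this plugin.
--                     return False
--                 # if dep_op is "or" (or undefined), try the rest of these.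
--                 continue
--             # A single match.
--             match = True
--     return match
-- ===== SOURCE B (Python) =====
-- def _fomod_flags_match(flags: dict, expected_flags: dict) -> bool:
--     """Count-based reformulation: count how many expected keys are present in
--     flags and how many of those agree in value, then decide arithmetically."""
--     present = sum(1 for k in expected_flags if k in flags)
--     agree = sum(1 for k, v in expected_flags.items() if k in flags and flags[k] == v)
--     if expected_flags.get("operator") == "and":
--         return agree == present and present > 0
--     return agree > 0
-- ===== Notes on version B (the rewrite author's own statement) =====
-- stated objective: alternative
-- what changed: Replaces A's single accumulating boolean scan with early return by a count-based formulation: two staged counting passes (expected keys present in flags, and of those the ones whose values agree) followed by arithmetic comparisons of the counts (agree == present and present > 0 for 'and', agree > 0 otherwise).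
import Mathlib
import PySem

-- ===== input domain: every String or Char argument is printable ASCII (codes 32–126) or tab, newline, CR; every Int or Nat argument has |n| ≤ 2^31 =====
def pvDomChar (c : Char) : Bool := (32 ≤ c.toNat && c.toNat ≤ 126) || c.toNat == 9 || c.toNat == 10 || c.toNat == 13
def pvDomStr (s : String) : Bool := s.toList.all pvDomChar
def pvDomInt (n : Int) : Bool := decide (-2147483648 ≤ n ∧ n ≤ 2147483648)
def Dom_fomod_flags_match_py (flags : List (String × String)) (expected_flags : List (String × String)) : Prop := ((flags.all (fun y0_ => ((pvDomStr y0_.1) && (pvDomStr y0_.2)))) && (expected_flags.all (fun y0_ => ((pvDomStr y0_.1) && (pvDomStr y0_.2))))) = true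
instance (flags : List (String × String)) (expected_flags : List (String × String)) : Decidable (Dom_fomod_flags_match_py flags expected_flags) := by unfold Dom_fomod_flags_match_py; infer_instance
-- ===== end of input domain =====

-- B replaces A's accumulating boolean scan with two staged counting passes and
-- arithmetic comparisons of the counts; same return value, alternative decomposition.

-- ===== PORT A =====
-- the for-loop over expected_flags.items() with its `match` accumulator and early return
def fomodLoopA (fd : PySem.Dict String String) (ed : PySem.Dict String String) :
    List (String × String) → Bool → Bool
  | [], m => m
  | (k, v) :: rest, m =>
    if fd.contains k then
      if fd.getD k "" != v then
        if ed.contains "operator" && ed.getD "operator" "" == "and" then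
          false
        else
          fomodLoopA fd ed rest m
      else
        fomodLoopA fd ed rest true
    else
      fomodLoopA fd ed rest m

def fomod_flags_match_py (flags : List (String × String)) (expected_flags : List (String × String)) : Bool :=
  let fd := PySem.Dict.ofList flags
  let ed := PySem.Dict.ofList expected_flags
  fomodLoopA fd ed ed.items false

-- ===== PORT B =====
-- present = sum(1 for k in expected_flags if k in flags); agree = sum(1 for k, v in
-- expected_flags.items() if k in flags and flags[k] == v); then compare the counts.
def fomod_flags_match_py_alt (flags : List (String × String)) (expected_flags : List (String × String)) : Bool :=
  let fd := PySem.Dict.ofList flags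
  let ed := PySem.Dict.ofList expected_flags
  let present := ed.items.countP (fun kv => fd.contains kv.1)
  let agree := ed.items.countP (fun kv => fd.contains kv.1 && (fd.getD kv.1 "" == kv.2))
  if ed.get? "operator" == some "and" then
    decide (agree = present) && decide (0 < present)
  else
    decide (0 < agree)

-- ===== PRECONDITION & SPEC =====
def Spec_fomod_flags_match_py (flags : List (String × String)) (expected_flags : List (String × String)) (out : Bool) : Prop := out = fomod_flags_match_py_alt flags expected_flags
instance (flags : List (String × String)) (expected_flags : List (String × String)) (out : Bool) : Decidable (Spec_fomod_flags_match_py flags expected_flags out) := by unfold Spec_fomod_flags_match_py; infer_instance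

-- ===== CLAIM (what is proved, stated in full; the proofs are below) =====
def Claim_equal_fomod_flags_match_py : Prop := ∀ (flags : List (String × String)) (expected_flags : List (String × String)), Dom_fomod_flags_match_py flags expected_flags → Spec_fomod_flags_match_py flags expected_flags (fomod_flags_match_py flags expected_flags)

-- ===== LEMMAS AND PROOFS =====

-- A's loop, under the "and" operator: all present keys agree AND (m or some key present)
lemma loopA_and (fd ed : PySem.Dict String String)
    (hc : (ed.contains "operator" && ed.getD "operator" "" == "and") = true) :
    ∀ (l : List (String × String)) (m : Bool),
      fomodLoopA fd ed l m =
        ((l.filter (fun kv => fd.contains kv.1)).all (fun kv => fd.getD kv.1 "" == kv.2)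
          && (m || !(l.filter (fun kv => fd.contains kv.1)).isEmpty)) := by
  intro l
  induction l with
  | nil => intro m; simp [fomodLoopA]
  | cons kv rest ih =>
    intro m
    obtain ⟨k, v⟩ := kv
    by_cases hk : fd.contains k = true
    · by_cases hv : fd.getD k "" = v
      · simp [fomodLoopA, hk, hv, ih]
      · simp [fomodLoopA, hk, hv, hc]
    · simp only [Bool.not_eq_true] at hk
      simp [fomodLoopA, hk, ih]

-- A's loop, otherwise: m or some present key agrees
lemma loopA_or (fd ed : PySem.Dict String String)
    (hc : (ed.contains "operator" && ed.getD "operator" "" == "and") = false) :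
    ∀ (l : List (String × String)) (m : Bool),
      fomodLoopA fd ed l m =
        (m || (l.filter (fun kv => fd.contains kv.1)).any (fun kv => fd.getD kv.1 "" == kv.2)) := by
  intro l
  induction l with
  | nil => intro m; simp [fomodLoopA]
  | cons kv rest ih =>
    intro m
    obtain ⟨k, v⟩ := kv
    by_cases hk : fd.contains k = true
    · by_cases hv : fd.getD k "" = v
      · simp [fomodLoopA, hk, hv, ih]
      · have hb : (fd.getD k "" == v) = false := by simp [hv]
        simp [fomodLoopA, hk, hv, hc, ih, hb]
    · simp only [Bool.not_eq_true] at hk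
      simp [fomodLoopA, hk, ih]

-- the loop condition on the dict equals B's get? test
lemma cond_eq (ed : PySem.Dict String String) :
    (ed.contains "operator" && ed.getD "operator" "" == "and")
      = (ed.get? "operator" == some "and") := by
  cases h : ed.get? "operator" with
  | none =>
    have hc : ed.contains "operator" = false := by
      simpa using (PySem.Dict.get?_eq_none_iff_contains (d := ed) (k := "operator")).mp h
    simp [hc, PySem.Dict.getD, h]
  | some w =>
    have hc : ed.contains "operator" = true := by
      by_contra hb
      rw [Bool.not_eq_true] at hb
      have := (PySem.Dict.get?_eq_none_iff_contains (d := ed) (k := "operator")).mpr hb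
      simp [h] at this
    simp [hc, PySem.Dict.getD, h]

-- bridges: boolean scans over the filtered list vs counting
lemma all_filter_eq_count {α : Type} (p q : α → Bool) (l : List α) :
    (l.filter p).all q
      = decide (l.countP (fun x => p x && q x) = l.countP p) := by
  induction l with
  | nil => simp
  | cons a rest ih =>
    by_cases hp : p a = true
    · by_cases hq : q a = true
      · simp [List.countP_cons, hp, hq, ih]
      · simp only [Bool.not_eq_true] at hq
        have hle : rest.countP (fun x => p x && q x) ≤ rest.countP p :=
          List.countP_mono_left (by intro x _ h; exact (Bool.and_elim_left h))
        simp [List.countP_cons, hp, hq]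
        omega
    · simp only [Bool.not_eq_true] at hp
      simp [List.countP_cons, hp, ih]

lemma not_isEmpty_filter_eq_count {α : Type} (p : α → Bool) (l : List α) :
    (!(l.filter p).isEmpty) = decide (0 < l.countP p) := by
  rw [List.countP_eq_length_filter]
  cases h : l.filter p with
  | nil => simp [h]
  | cons a t => simp [h]

lemma any_filter_eq_count {α : Type} (p q : α → Bool) (l : List α) :
    (l.filter p).any q = decide (0 < l.countP (fun x => p x && q x)) := by
  induction l with
  | nil => simp
  | cons a rest ih =>
    by_cases hp : p a = true
    · by_cases hq : q a = true
      · simp [List.countP_cons, hp, hq]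
      · simp only [Bool.not_eq_true] at hq
        simp [List.countP_cons, hp, hq, ih]
    · simp only [Bool.not_eq_true] at hp
      simp [List.countP_cons, hp, ih]

-- ===== VERDICT (by name: the statement is the Claim_ definition above) =====
theorem fomod_flags_match_py_spec : Claim_equal_fomod_flags_match_py := by
  intro flags expected_flags _
  unfold Spec_fomod_flags_match_py fomod_flags_match_py fomod_flags_match_py_alt
  dsimp only
  set fd := PySem.Dict.ofList flags with hfd
  set ed := PySem.Dict.ofList expected_flags with hed
  rw [← cond_eq]
  by_cases hc : (ed.contains "operator" && ed.getD "operator" "" == "and") = true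
  · rw [if_pos hc, loopA_and fd ed hc]
    rw [all_filter_eq_count, not_isEmpty_filter_eq_count]
    simp
  · rw [Bool.not_eq_true] at hc
    rw [if_neg (by simp [hc]), loopA_or fd ed hc]
    rw [any_filter_eq_count]
    simp
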